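-- pv_equiv track=rewrite | github.com/natapone/tts_audiobook | TextToAudiobook.py | replace_tag_ssml
-- ===== SOURCE A (Python) =====
-- def replace_tag_ssml(s):
--     ssml_tags = {
--         '[[-title_begin-]]': '<prosody rate="slow">',
--         '[[-title_end-]]': '</prosody>',
--         '[[-header_begin-]]': '<prosody rate="slow">',
--         '[[-header_end-]]': '</prosody>',
--         '[[-break_weak-]]': '<break time="600ms"/>',
--         '[[-emphasis_strong-]]': '<emphasis level="strong">',
--         '[[-emphasis_moderate-]]': '<emphasis level="moderate">',
--         '[[-emphasis_end-]]': '</emphasis>'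
--     }
--
--     for key, value in ssml_tags.items():
--         s = s.replace(key, value)
--
--     return s
-- ===== SOURCE B (Python) =====
-- def replace_tag_ssml(s):
--     names = {
--         'title_begin': '<prosody rate="slow">',
--         'title_end': '</prosody>',
--         'header_begin': '<prosody rate="slow">',
--         'header_end': '</prosody>',
--         'break_weak': '<break time="600ms"/>',
--         'emphasis_strong': '<emphasis level="strong">',
--         'emphasis_moderate': '<emphasis level="moderate">',
--         'emphasis_end': '</emphasis>',
--     }
--     res = ''
--     while True:
--         j = s.find('[[-')
--         if j < 0:
--             return res + s
--         k = s.find('-]]', j + 3)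
--         if k >= 0 and s[j + 3:k] in names:
--             res += s[:j] + names[s[j + 3:k]]
--             s = s[k + 3:]
--         else:
--             res += s[:j + 3]
--             s = s[j + 3:]
-- ===== Notes on version B (the rewrite author's own statement) =====
-- stated objective: alternative
-- what changed: A runs eight sequential full-string str.replace passes, one per placeholder; B makes a single left-to-right pass driven by str.find: it locates each opening delimiter, finds the next closing delimiter, looks the inner tag name up in a dict keyed by the bare names, and splices the replacement (or the literal text) into an output accumulator.
import Mathlib
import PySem

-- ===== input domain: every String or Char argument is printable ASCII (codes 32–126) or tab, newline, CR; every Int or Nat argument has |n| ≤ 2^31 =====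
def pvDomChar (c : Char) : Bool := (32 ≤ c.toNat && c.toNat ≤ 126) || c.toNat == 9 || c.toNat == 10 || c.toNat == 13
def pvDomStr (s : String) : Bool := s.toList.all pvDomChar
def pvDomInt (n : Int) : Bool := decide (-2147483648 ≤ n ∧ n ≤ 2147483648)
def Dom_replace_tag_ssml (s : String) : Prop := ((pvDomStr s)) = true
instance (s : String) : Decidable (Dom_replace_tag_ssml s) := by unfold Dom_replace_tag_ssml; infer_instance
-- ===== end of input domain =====

-- B replaces A's eight full-string str.replace passes by ONE find-driven scan that parses
-- '[[-name-]]' delimiter pairs and looks the bare name up in a dict (alternative decomposition).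

-- ===== PORT A =====
-- A's dict literal (distinct keys) as an association list in insertion order.
def pvSsmlTags : List (String × String) :=
  [ ("[[-title_begin-]]", "<prosody rate=\"slow\">"),
    ("[[-title_end-]]", "</prosody>"),
    ("[[-header_begin-]]", "<prosody rate=\"slow\">"),
    ("[[-header_end-]]", "</prosody>"),
    ("[[-break_weak-]]", "<break time=\"600ms\"/>"),
    ("[[-emphasis_strong-]]", "<emphasis level=\"strong\">"),
    ("[[-emphasis_moderate-]]", "<emphasis level=\"moderate\">"),
    ("[[-emphasis_end-]]", "</emphasis>") ]

-- 'for key, value in ssml_tags.items(): s = s.replace(key, value)'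
def replace_tag_ssml (s : String) : String :=
  pvSsmlTags.foldl (fun s kv => PySem.Str.replace s kv.1 kv.2) s

-- ===== PORT B =====
-- Source B's delimiters and its dict keyed by the BARE tag names, over List Char.
def pvOpen : List Char := ['[', '[', '-']
def pvClose : List Char := ['-', ']', ']']

def pvNames : List (List Char × List Char) :=
  [ ("title_begin".toList, "<prosody rate=\"slow\">".toList),
    ("title_end".toList, "</prosody>".toList),
    ("header_begin".toList, "<prosody rate=\"slow\">".toList),
    ("header_end".toList, "</prosody>".toList),
    ("break_weak".toList, "<break time=\"600ms\"/>".toList),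
    ("emphasis_strong".toList, "<emphasis level=\"strong\">".toList),
    ("emphasis_moderate".toList, "<emphasis level=\"moderate\">".toList),
    ("emphasis_end".toList, "</emphasis>".toList) ]

-- Source B's while-loop, res the accumulator, s the remaining string.
-- j = s.find('[[-'); k = s.find('-]]', j+3) is ported RELATIVE to the suffix s[j+3:]
-- (exact: PySem.Chars.findFrom_natCast says find-from-start is find on the drop, offset by j+3);
-- 's[j+3:k] in names' + 'names[s[j+3:k]]' is the first (unique) matching entry: List.find?.
def bLoop (res s : List Char) : List Char :=
  if hj : 0 ≤ PySem.Chars.find s pvOpen then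
    let j := (PySem.Chars.find s pvOpen).toNat
    let k := PySem.Chars.find (s.drop (j + 3)) pvClose
    if 0 ≤ k then
      match pvNames.find? (fun kv => kv.1 == (s.drop (j + 3)).take k.toNat) with
      | some kv => bLoop (res ++ s.take j ++ kv.2) (s.drop (j + 3 + k.toNat + 3))
      | none    => bLoop (res ++ s.take (j + 3)) (s.drop (j + 3))
    else bLoop (res ++ s.take (j + 3)) (s.drop (j + 3))
  else res ++ s
termination_by s.length
decreasing_by
  all_goals
    have h := (PySem.Chars.find_spec hj).1
    have h3 := h.length_le
    simp only [pvOpen, List.length_drop, List.length_cons, List.length_nil] at h3 ⊢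
    omega

def replace_tag_ssml_alt (s : String) : String := String.ofList (bLoop [] s.toList)

-- ===== PRECONDITION & SPEC =====
def Spec_replace_tag_ssml (s : String) (out : String) : Prop := out = replace_tag_ssml_alt s
instance (s : String) (out : String) : Decidable (Spec_replace_tag_ssml s out) := by unfold Spec_replace_tag_ssml; infer_instance

-- ===== CLAIM (what is proved, stated in full; the proofs are below) =====
def Claim_equal_replace_tag_ssml : Prop := ∀ (s : String), Dom_replace_tag_ssml s → Spec_replace_tag_ssml s (replace_tag_ssml s)

-- ===== LEMMAS AND PROOFS =====

-- Proof-side common reference: the tag table over List Char, and the one-pass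
-- leftmost-match scanner pvScan; both A's fold and B's find-driven loop equal pvScan.
def pvTags : List (List Char × List Char) :=
  pvSsmlTags.map (fun kv => (kv.1.toList, kv.2.toList))

def pvScan : List Char → List Char
  | [] => []
  | c :: t =>
    match pvTags.find? (fun kv => kv.1.isPrefixOf (c :: t)) with
    | some kv => kv.2 ++ pvScan (t.drop (kv.1.length - 1))
    | none => c :: pvScan t
termination_by l => l.length
decreasing_by all_goals simp only [List.length_cons, List.length_drop]; omega

-- Structural characterisation of Python's s.replace(old, new) for non-empty old.
def pvRep (old new : List Char) : List Char → List Char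
  | [] => []
  | c :: t =>
    if old.isPrefixOf (c :: t) then new ++ pvRep old new (t.drop (old.length - 1))
    else c :: pvRep old new t
termination_by l => l.length
decreasing_by all_goals simp only [List.length_cons, List.length_drop]; omega

lemma pvGo_eq (old new : List Char) (hold : old ≠ []) :
    ∀ (fuel : Nat) (l acc : List Char), l.length ≤ fuel →
      PySem.Chars.replace.go old new fuel l acc = acc.reverse ++ pvRep old new l := by
  intro fuel
  induction fuel with
  | zero =>
      intro l acc h
      have : l = [] := by
        cases l with
        | nil => rfl
        | cons a b => simp at h
      subst this
      simp [PySem.Chars.replace.go, pvRep]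
  | succ n ih =>
      intro l acc h
      cases l with
      | nil => simp [PySem.Chars.replace.go, pvRep]
      | cons c t =>
        by_cases hp : old.isPrefixOf (c :: t)
        · have hlen : old.length ≥ 1 := by cases old <;> simp_all
          have hdrop : (c :: t).drop old.length = t.drop (old.length - 1) := by
            cases old with
            | nil => simp_all
            | cons o os => simp
          rw [PySem.Chars.replace.go]
          simp only [hp, if_pos]
          rw [ih ((c :: t).drop old.length) (new.reverse ++ acc)
                (by simp at h ⊢; omega)]
          rw [hdrop]
          simp [pvRep, hp]
        · rw [PySem.Chars.replace.go]
          simp only [hp]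
          rw [ih t (c :: acc) (by simp at h; omega)]
          simp [pvRep, hp]

lemma pvReplace_eq (old new l : List Char) (hold : old ≠ []) :
    PySem.Chars.replace l old new = pvRep old new l := by
  have : old.isEmpty = false := by cases old <;> simp_all
  rw [PySem.Chars.replace]
  simp only [this]
  rw [pvGo_eq old new hold l.length l [] le_rfl]
  simp

-- k is a prefix of u ++ x only via the boundary: u is a prefix of k or k a prefix of u.
lemma pvPrefix_append (u k x : List Char) (h : k <+: u ++ x) : u <+: k ∨ k <+: u := by
  induction u generalizing k with
  | nil => left; exact List.nil_prefix
  | cons c u' ih =>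
      cases k with
      | nil => right; exact List.nil_prefix
      | cons d k' =>
          obtain ⟨hw, h'⟩ : d = c ∧ k' <+: u' ++ x := by
            rcases h with ⟨r, hr⟩
            simp at hr
            exact ⟨hr.1, ⟨r, hr.2⟩⟩
          subst hw
          rcases ih k' h' with h2 | h2
          · left; exact List.cons_prefix_cons.mpr ⟨rfl, h2⟩
          · right; exact List.cons_prefix_cons.mpr ⟨rfl, h2⟩

-- "k never fires along u": no suffix of u (cut at i < |u|) aligns with k in either direction.
def pvInert (k u : List Char) : Prop :=
  ∀ i, i < u.length → ¬ (u.drop i <+: k) ∧ ¬ (k <+: u.drop i)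

lemma pvRep_append (k v u x : List Char) (h : pvInert k u) :
    pvRep k v (u ++ x) = u ++ pvRep k v x := by
  induction u with
  | nil => simp
  | cons c u' ih =>
      have h0 := h 0 (by simp)
      have hnp : ¬ k.isPrefixOf (c :: (u' ++ x)) = true := by
        intro hk
        rcases pvPrefix_append (c :: u') k x (List.isPrefixOf_iff_prefix.mp hk) with h2 | h2
        · exact h0.1 h2
        · exact h0.2 h2
      rw [List.cons_append, pvRep]
      simp only [hnp, if_neg, Bool.false_eq_true, not_false_iff]
      rw [ih (fun i hi => h (i + 1) (by simp; omega))]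
      simp

-- Output of one replace pass: a tag-free prefix (no '<') of the output is a prefix of the input
-- (every replacement value starts with '<').
lemma pvRep_prefix_rev (k v x : List Char) (hv : ∃ v', v = '<' :: v') :
    ∀ w, '<' ∉ w → w <+: pvRep k v x → w <+: x := by
  induction x using pvRep.induct k with
  | case1 => intro w hw h; simpa [pvRep] using h
  | case2 c t hp ih =>
      intro w hw h
      rw [pvRep, if_pos hp] at h
      cases w with
      | nil => exact List.nil_prefix
      | cons a w' =>
          exfalso
          rcases hv with ⟨v', rfl⟩
          have : a = '<' := by
            rcases h with ⟨r, hr⟩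
            simp at hr
            exact hr.1
          exact hw (by simp [this])
  | case3 c t hp ih =>
      intro w hw h
      rw [pvRep, if_neg hp] at h
      cases w with
      | nil => exact List.nil_prefix
      | cons a w' =>
          obtain ⟨ha, h'⟩ : a = c ∧ w' <+: pvRep k v t := by
            rcases h with ⟨r, hr⟩
            simp at hr
            exact ⟨hr.1, ⟨r, hr.2⟩⟩
          subst ha
          have hw' : '<' ∉ w' := fun hm => hw (by simp [hm])
          exact List.cons_prefix_cons.mpr ⟨rfl, ih w' hw' h'⟩

-- Facts about the tag table, all decidable:
-- every key nonempty, no '<' in a key, every value starts with '<'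
lemma pvGood : ∀ kv ∈ pvTags, kv.1 ≠ [] ∧ '<' ∉ kv.1 ∧ kv.2.head? = some '<' := by
  unfold pvTags pvSsmlTags; decide

-- distinct keys are never prefixes of one another; no key fires strictly inside a key;
-- no key fires anywhere along a value
lemma pvNoOv :
    (∀ kv ∈ pvTags, ∀ kv' ∈ pvTags, kv.1 ≠ kv'.1 → ¬ kv.1 <+: kv'.1) ∧
    (∀ kv ∈ pvTags, ∀ kv' ∈ pvTags, ∀ i < kv.1.length, 0 < i →
        ¬ (kv.1.drop i <+: kv'.1) ∧ ¬ (kv'.1 <+: kv.1.drop i)) ∧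
    (∀ kv ∈ pvTags, ∀ kv' ∈ pvTags, pvInert kv'.1 kv.2) := by
  unfold pvInert pvTags pvSsmlTags; decide

def pvStep (s : List Char) (kv : List Char × List Char) : List Char := pvRep kv.1 kv.2 s

-- a value (or any string all tags are inert on) passes unchanged through a whole fold
lemma pvFoldl_append (ts : List (List Char × List Char)) (u : List Char)
    (h : ∀ kv ∈ ts, pvInert kv.1 u) :
    ∀ z, ts.foldl pvStep (u ++ z) = u ++ ts.foldl pvStep z := by
  induction ts with
  | nil => intro z; simp
  | cons kv ts' ih =>
      intro z
      simp only [List.foldl_cons]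
      rw [show pvStep (u ++ z) kv = u ++ pvStep z kv from
            pvRep_append kv.1 kv.2 u z (h kv (by simp))]
      exact ih (fun kv' hm => h kv' (by simp [hm])) (pvStep z kv)

-- no tag matches at the head: the head character passes through the whole fold
lemma pvFoldl_cons (ts : List (List Char × List Char))
    (hg : ∀ kv ∈ ts, kv.1 ≠ [] ∧ '<' ∉ kv.1 ∧ kv.2.head? = some '<')
    (c : Char) : ∀ t, (∀ kv ∈ ts, ¬ kv.1 <+: c :: t) →
    ts.foldl pvStep (c :: t) = c :: ts.foldl pvStep t := by
  induction ts with
  | nil => intro t _; simp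
  | cons kv ts' ih =>
      intro t h
      obtain ⟨hne, hlt, hv⟩ := hg kv (by simp)
      have hv' : ∃ v', kv.2 = '<' :: v' := by
        cases hkv2 : kv.2 with
        | nil => rw [hkv2] at hv; simp at hv
        | cons a v' =>
            rw [hkv2] at hv
            simp only [List.head?_cons, Option.some.injEq] at hv
            subst hv
            exact ⟨v', rfl⟩
      simp only [List.foldl_cons]
      have hstep : pvStep (c :: t) kv = c :: pvStep t kv := by
        unfold pvStep
        rw [pvRep]
        have : ¬ kv.1.isPrefixOf (c :: t) = true := by
          intro hk
          exact h kv (by simp) (List.isPrefixOf_iff_prefix.mp hk)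
        simp only [this, Bool.false_eq_true, if_false]
      rw [hstep]
      apply ih (fun kv' hm => hg kv' (by simp [hm]))
      intro kv' hm hpre
      obtain ⟨hne', hlt', hv2'⟩ := hg kv' (by simp [hm])
      cases hk' : kv'.1 with
      | nil => exact hne' hk'
      | cons a w' =>
          rw [hk'] at hpre
          obtain ⟨ha, h'⟩ : a = c ∧ w' <+: pvStep t kv := by
            rcases hpre with ⟨r, hr⟩
            simp at hr
            exact ⟨hr.1, ⟨r, hr.2⟩⟩
          have hw' : '<' ∉ w' := by
            intro hm2
            exact hlt' (by rw [hk']; simp [hm2])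
          have : w' <+: t := pvRep_prefix_rev kv.1 kv.2 t hv' w' hw' h'
          exact h kv' (by simp [hm]) (by rw [hk', ha]; exact List.cons_prefix_cons.mpr ⟨rfl, this⟩)

-- under prefix-freedom, a key match at the head of 'k ++ anything' can only be k itself:
-- the winning entry of the lookup does not depend on what follows k
lemma pvFind_transfer (ts : List (List Char × List Char)) (hs : ∀ kv ∈ ts, kv ∈ pvTags)
    (k v rest X : List Char)
    (h : ts.find? (fun kv => kv.1.isPrefixOf (k ++ rest)) = some (k, v)) :
    ts.find? (fun kv => kv.1.isPrefixOf (k ++ X)) = some (k, v) := by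
  induction ts with
  | nil => simp at h
  | cons kv1 ts'' ih =>
      have hs'' : ∀ kv ∈ ts'', kv ∈ pvTags := fun kv hm => hs kv (by simp [hm])
      by_cases h1 : kv1.1.isPrefixOf (k ++ rest) = true
      · simp only [List.find?_cons, h1] at h
        obtain rfl : kv1 = (k, v) := by simpa using h
        have hpX : ((k, v).1.isPrefixOf (k ++ X)) = true :=
          List.isPrefixOf_iff_prefix.mpr ⟨X, rfl⟩
        simp [hpX]
      · simp only [Bool.not_eq_true] at h1
        simp only [List.find?_cons, h1] at h
        have hmem1 : (k, v) ∈ ts'' := List.mem_of_find?_eq_some h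
        have hne1 : kv1.1 ≠ k := by
          intro he
          rw [he, List.isPrefixOf_iff_prefix.mpr ⟨rest, rfl⟩ ] at h1
          simp at h1
        have hnp1 : ¬ kv1.1.isPrefixOf (k ++ X) = true := by
          intro hk1
          rcases pvPrefix_append k kv1.1 X (List.isPrefixOf_iff_prefix.mp hk1) with h2 | h2
          · exact pvNoOv.1 (k, v) (hs'' (k, v) hmem1) kv1 (hs kv1 (by simp))
              (Ne.symm hne1) h2
          · exact pvNoOv.1 kv1 (hs kv1 (by simp)) (k, v) (hs'' (k, v) hmem1) hne1 h2
        simp only [Bool.not_eq_true] at hnp1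
        simp only [List.find?_cons, hnp1]
        exact ih hs'' h

-- a tag matches: the fold replaces it and continues after it
lemma pvFoldl_match (ts : List (List Char × List Char))
    (hsub : ∀ kv ∈ ts, kv ∈ pvTags) :
    ∀ (l : List Char) (k v : List Char),
      ts.find? (fun kv => kv.1.isPrefixOf l) = some (k, v) →
      ts.foldl pvStep l = v ++ ts.foldl pvStep (l.drop k.length) := by
  induction ts with
  | nil => intro l k v h; simp at h
  | cons kv0 ts' ih =>
      intro l k v h
      have hsub' : ∀ kv ∈ ts', kv ∈ pvTags := fun kv hm => hsub kv (by simp [hm])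
      by_cases h0 : kv0.1.isPrefixOf l = true
      · simp only [List.find?_cons, h0] at h
        obtain rfl : kv0 = (k, v) := by simpa using h
        have hk : k <+: l := List.isPrefixOf_iff_prefix.mp h0
        obtain ⟨hkne, -, -⟩ := pvGood (k, v) (hsub (k, v) (by simp))
        rcases hk with ⟨rest, rfl⟩
        have hdropl : (k ++ rest).drop k.length = rest := by simp
        have hrep : pvRep k v (k ++ rest) = v ++ pvRep k v rest := by
          cases k with
          | nil => exact absurd rfl hkne
          | cons a k' =>
              rw [List.cons_append, pvRep,
                if_pos (List.isPrefixOf_iff_prefix.mpr ⟨rest, by simp⟩)]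
              simp
        simp only [List.foldl_cons, hdropl]
        show ts'.foldl pvStep (pvRep k v (k ++ rest)) = v ++ ts'.foldl pvStep (pvRep k v rest)
        rw [hrep]
        exact pvFoldl_append ts' v
          (fun kv' hm => (pvNoOv.2.2 (k, v) (hsub (k, v) (by simp)) kv' (hsub' kv' hm))) _
      · simp only [Bool.not_eq_true] at h0
        simp only [List.find?_cons, h0] at h
        have hmem : (k, v) ∈ ts' := List.mem_of_find?_eq_some h
        have hkpre : k <+: l := by
          have := List.find?_some h
          exact List.isPrefixOf_iff_prefix.mp (by simpa using this)
        obtain ⟨hkne, -, -⟩ := pvGood (k, v) (hsub' (k, v) hmem)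
        obtain ⟨hkne0, -, -⟩ := pvGood kv0 (hsub kv0 (by simp))
        rcases hkpre with ⟨rest, rfl⟩
        have hkk0 : k ≠ kv0.1 := by
          intro he
          rw [← he, List.isPrefixOf_iff_prefix.mpr ⟨rest, rfl⟩ ] at h0
          simp at h0
        have hinert : pvInert kv0.1 k := by
          intro i hi
          rcases Nat.eq_zero_or_pos i with rfl | hip
          · simp only [List.drop_zero]
            exact ⟨pvNoOv.1 (k, v) (hsub' (k, v) hmem) kv0 (hsub kv0 (by simp)) hkk0,
                   pvNoOv.1 kv0 (hsub kv0 (by simp)) (k, v) (hsub' (k, v) hmem) (Ne.symm hkk0)⟩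
          · exact pvNoOv.2.1 (k, v) (hsub' (k, v) hmem) kv0 (hsub kv0 (by simp)) i hi hip
        have hstep : pvStep (k ++ rest) kv0 = k ++ pvStep rest kv0 :=
          pvRep_append kv0.1 kv0.2 k rest hinert
        have hfind' : ts'.find? (fun kv => kv.1.isPrefixOf (k ++ pvStep rest kv0)) = some (k, v) :=
          pvFind_transfer ts' hsub' k v rest (pvStep rest kv0) h
        have hdropl : (k ++ rest).drop k.length = rest := by simp
        simp only [List.foldl_cons, hdropl, hstep]
        rw [ih hsub' (k ++ pvStep rest kv0) k v hfind']
        simp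

lemma pvFoldl_nil (ts : List (List Char × List Char)) : ts.foldl pvStep [] = [] := by
  induction ts with
  | nil => rfl
  | cons kv ts' ih => simpa [pvStep, pvRep] using ih

-- A's fold equals the one-pass scan
lemma pvMain : ∀ l : List Char, pvTags.foldl pvStep l = pvScan l := by
  intro l
  induction l using pvScan.induct with
  | case1 => simp [pvScan, pvFoldl_nil]
  | case2 c t kv hfind ih =>
      rw [pvScan, hfind]
      obtain ⟨k, v⟩ := kv
      have hk : k <+: c :: t := by
        have := List.find?_some hfind
        exact List.isPrefixOf_iff_prefix.mp (by simpa using this)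
      obtain ⟨hkne, -, -⟩ := pvGood (k, v)
        (List.mem_of_find?_eq_some hfind)
      have hdrop : (c :: t).drop k.length = t.drop (k.length - 1) := by
        cases k with
        | nil => exact absurd rfl hkne
        | cons a k' => simp
      rw [pvFoldl_match pvTags (fun kv hm => hm) (c :: t) k v hfind, hdrop, ih]
  | case3 c t hfind ih =>
      rw [pvScan, hfind]
      rw [pvFoldl_cons pvTags pvGood c t
        (fun kv hm hp => by
          have := List.find?_eq_none.mp hfind kv hm
          exact this (List.isPrefixOf_iff_prefix.mpr hp)), ih]

-- bridge: A's string fold computes the char-list fold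
lemma pvA_eq (s : String) :
    replace_tag_ssml s = String.ofList (pvTags.foldl pvStep s.toList) := by
  unfold replace_tag_ssml pvSsmlTags
  simp only [List.foldl_cons, List.foldl_nil]
  simp only [PySem.Str.replace, String.toList_ofList]
  unfold pvTags pvSsmlTags
  simp only [List.map_cons, List.map_nil, List.foldl_cons, List.foldl_nil, pvStep]
  rw [pvReplace_eq _ _ _ (by decide), pvReplace_eq _ _ _ (by decide),
      pvReplace_eq _ _ _ (by decide), pvReplace_eq _ _ _ (by decide),
      pvReplace_eq _ _ _ (by decide), pvReplace_eq _ _ _ (by decide),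
      pvReplace_eq _ _ _ (by decide), pvReplace_eq _ _ _ (by decide)]

-- ===== B-side lemmas =====

-- the tag table is exactly pvOpen ++ name ++ pvClose over the name dict
lemma pvLink : pvTags = pvNames.map (fun kv => (pvOpen ++ kv.1 ++ pvClose, kv.2)) := by
  unfold pvTags pvSsmlTags pvNames pvOpen pvClose; rfl

-- names contain no '-'; name keys are pairwise distinct; keys pairwise prefix-free
lemma pvNameNoDash : ∀ kv ∈ pvNames, ∀ c ∈ kv.1, c ≠ '-' := by
  have h : (pvNames.all (fun kv => kv.1.all (fun c => !(c == '-')))) = true := by rfl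
  simpa using h

lemma pvTagsPairwise :
    pvTags.Pairwise (fun a b => ¬ a.1 <+: b.1 ∧ ¬ b.1 <+: a.1) := by
  unfold pvTags pvSsmlTags; decide

-- converse of find_spec: a first occurrence determines find
lemma pvFind_eq (l pat : List Char) (n : Nat) (h1 : pat <+: l.drop n)
    (h2 : ∀ i < n, ¬ pat <+: l.drop i) : PySem.Chars.find l pat = (n : Int) := by
  have hin : pat <:+: l := by
    rcases h1 with ⟨r, hr⟩
    exact ⟨l.take n, r, by rw [List.append_assoc, hr, List.take_append_drop]⟩
  have hnn : 0 ≤ PySem.Chars.find l pat := (PySem.Chars.find_nonneg_iff l pat).mpr hin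
  obtain ⟨hpre, hmin⟩ := PySem.Chars.find_spec hnn
  have : (PySem.Chars.find l pat).toNat = n := by
    rcases Nat.lt_trichotomy (PySem.Chars.find l pat).toNat n with h | h | h
    · exact absurd hpre (h2 _ h)
    · exact h
    · exact absurd h1 (hmin n h)
  omega

-- no key matches at any position i < n ⇒ pvScan copies the first n characters
lemma pvScan_pass (n : Nat) : ∀ l : List Char,
    (∀ i < n, ∀ kv ∈ pvTags, ¬ kv.1 <+: l.drop i) →
    pvScan l = l.take n ++ pvScan (l.drop n) := by
  induction n with
  | zero => intro l _; simp
  | succ m ih =>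
      intro l h
      cases l with
      | nil => simp
      | cons c t =>
          have h0 : pvTags.find? (fun kv => kv.1.isPrefixOf (c :: t)) = none := by
            apply List.find?_eq_none.mpr
            intro kv hm hp
            exact h 0 (by omega) kv hm (List.isPrefixOf_iff_prefix.mp hp)
          rw [pvScan, h0]
          rw [ih t (fun i hi kv hm => by
            have := h (i + 1) (by omega) kv hm
            simpa using this)]
          simp

-- find? with a pairwise prefix-free table returns any member whose key matches
lemma pvFind?_unique (ts : List (List Char × List Char))
    (hp : ts.Pairwise (fun a b => ¬ a.1 <+: b.1 ∧ ¬ b.1 <+: a.1))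
    (kv : List Char × List Char) (hm : kv ∈ ts) (l : List Char) (h : kv.1 <+: l) :
    ts.find? (fun kv' => kv'.1.isPrefixOf l) = some kv := by
  induction ts with
  | nil => simp at hm
  | cons kv0 ts' ih =>
      have hpw := List.pairwise_cons.mp hp
      rcases List.mem_cons.mp hm with rfl | hm'
      · simp [List.isPrefixOf_iff_prefix.mpr h]
      · have hrel := hpw.1 kv hm'
        have h0 : ¬ kv0.1.isPrefixOf l = true := by
          intro hk0
          rcases List.prefix_or_prefix_of_prefix (List.isPrefixOf_iff_prefix.mp hk0) h with h2 | h2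
          · exact hrel.1 h2
          · exact hrel.2 h2
        simp only [Bool.not_eq_true] at h0
        simp only [List.find?_cons, h0]
        exact ih hpw.2 hm'

-- every tag key starts with pvOpen
lemma pvKeyOpen (kv : List Char × List Char) (hm : kv ∈ pvTags) : pvOpen <+: kv.1 := by
  rw [pvLink] at hm
  obtain ⟨nm, hnm, rfl⟩ := List.mem_map.mp hm
  exact ⟨nm.1 ++ pvClose, by simp⟩

-- pvOpen cannot match again one or two positions after a match
lemma pvOpenShift (l : List Char) (h : pvOpen <+: l) :
    ¬ pvOpen <+: l.drop 1 ∧ ¬ pvOpen <+: l.drop 2 := by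
  rcases h with ⟨r, hr⟩
  subst hr
  simp [pvOpen, List.cons_prefix_cons]

-- a key matching at the start of pvOpen ++ w forces: the first '-]]' in w sits right after
-- the name, and the name is in the dict
lemma pvKeyTest (w : List Char) (kv : List Char × List Char) (hm : kv ∈ pvTags)
    (h : kv.1 <+: pvOpen ++ w) :
    ∃ nm v, (nm, v) ∈ pvNames ∧ kv = (pvOpen ++ nm ++ pvClose, v) ∧
      PySem.Chars.find w pvClose = (nm.length : Int) ∧ w.take nm.length = nm := by
  rw [pvLink] at hm
  obtain ⟨⟨nm, v⟩, hnm, rfl⟩ := List.mem_map.mp hm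
  refine ⟨nm, v, hnm, rfl, ?_, ?_⟩
  · have h' : nm ++ pvClose <+: w := by
      rw [List.append_assoc] at h
      exact (List.prefix_append_right_inj pvOpen).mp h
    rcases h' with ⟨z, hz⟩
    apply pvFind_eq
    · have : w.drop nm.length = pvClose ++ z := by
        rw [← hz]; simp
      rw [this]; exact ⟨z, rfl⟩
    · intro i hi hpre
      have hwi : w.drop i = nm.drop i ++ (pvClose ++ z) := by
        rw [← hz, List.append_assoc, List.drop_append_of_le_length (by omega)]
      cases hni : nm.drop i with
      | nil => have := congrArg List.length hni; simp at this; omega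
      | cons c rest =>
          have hc : c ∈ nm := List.drop_subset i nm (by rw [hni]; simp)
          rw [hwi, hni] at hpre
          have : '-' = c := by
            rcases hpre with ⟨r2, hr2⟩
            simp [pvClose] at hr2
            exact hr2.1
          exact pvNameNoDash (nm, v) hnm c hc this.symm
  · have h' : nm ++ pvClose <+: w := by
      rw [List.append_assoc] at h
      exact (List.prefix_append_right_inj pvOpen).mp h
    rcases h' with ⟨z, hz⟩
    rw [← hz, List.append_assoc, List.take_left]

-- skipping three characters is safe: no key matches at i < j+3 when pvOpen first matches
-- at j and no key matches exactly at j
lemma pvSkipNoKey (s : List Char) (j : Nat)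
    (hopen : pvOpen <+: s.drop j)
    (hmin : ∀ i < j, ¬ pvOpen <+: s.drop i)
    (hnotag : ∀ kv' ∈ pvTags, ¬ kv'.1 <+: s.drop j) :
    ∀ i < j + 3, ∀ kv ∈ pvTags, ¬ kv.1 <+: s.drop i := by
  intro i hi kv hm hp
  have hop : pvOpen <+: s.drop i := (pvKeyOpen kv hm).trans hp
  rcases (by omega : i < j ∨ i = j ∨ i = j + 1 ∨ i = j + 2) with h | h | h | h
  · exact hmin i h hop
  · exact hnotag kv hm (h ▸ hp)
  · have h1 := (pvOpenShift (s.drop j) hopen).1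
    rw [List.drop_drop] at h1
    exact h1 (h ▸ hop)
  · have h2 := (pvOpenShift (s.drop j) hopen).2
    rw [List.drop_drop] at h2
    exact h2 (h ▸ hop)

-- main B lemma: the find-driven loop equals res ++ pvScan
lemma pvB_main : ∀ (res s : List Char), bLoop res s = res ++ pvScan s := by
  intro res s
  induction res, s using bLoop.induct with
  | case1 res s hj jj kk hk kv hfind ih =>
      have hJ : jj = (PySem.Chars.find s pvOpen).toNat := rfl
      have hK : kk = PySem.Chars.find (List.drop (jj + 3) s) pvClose := rfl
      rw [bLoop]
      simp only [dif_pos hj, ← hJ, ← hK, if_pos hk, hfind]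
      rw [ih]
      obtain ⟨hj1, hj2⟩ := PySem.Chars.find_spec hj
      rw [← hJ] at hj1 hj2
      set w := s.drop (jj + 3) with hwdef
      have hsj : s.drop jj = pvOpen ++ w := by
        rcases hj1 with ⟨r, hr⟩
        have : r = w := by
          have := congrArg (List.drop 3) hr
          simpa [pvOpen, hwdef, List.drop_drop, Nat.add_comm] using this
        rw [← hr, this]
      obtain ⟨hc1, -⟩ := PySem.Chars.find_spec hk
      rw [← hK] at hc1
      have hktn : kk.toNat ≤ w.length := by
        have := PySem.Chars.find_le_length w pvClose
        rw [← hK] at this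
        omega
      have hname : kv.1 = w.take kk.toNat := by
        have := List.find?_some hfind
        simpa using this
      have hmemN : kv ∈ pvNames := List.mem_of_find?_eq_some hfind
      have hlenname : kv.1.length = kk.toNat := by
        rw [hname, List.length_take]; omega
      have hw : w = kv.1 ++ (pvClose ++ w.drop (kk.toNat + 3)) := by
        rcases hc1 with ⟨z, hz⟩
        have h3 := congrArg (List.drop 3) hz
        rw [List.drop_drop] at h3
        simp only [pvClose, List.cons_append, List.nil_append, List.drop_succ_cons,
          List.drop_zero] at h3
        calc w = w.take kk.toNat ++ w.drop kk.toNat := (List.take_append_drop _ _).symm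
          _ = kv.1 ++ (pvClose ++ w.drop (kk.toNat + 3)) := by
              rw [← hname, ← hz, ← h3]
      have hkeymem : (pvOpen ++ kv.1 ++ pvClose, kv.2) ∈ pvTags := by
        rw [pvLink]
        exact List.mem_map.mpr ⟨kv, hmemN, rfl⟩
      have hkeypre : pvOpen ++ kv.1 ++ pvClose <+: s.drop jj := by
        rw [hsj, hw]
        exact ⟨w.drop (kk.toNat + 3), by simp⟩
      have hfindTags :
          pvTags.find? (fun kv' => kv'.1.isPrefixOf (s.drop jj)) =
            some (pvOpen ++ kv.1 ++ pvClose, kv.2) :=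
        pvFind?_unique pvTags pvTagsPairwise _ hkeymem _ hkeypre
      have hpass : pvScan s = s.take jj ++ pvScan (s.drop jj) :=
        pvScan_pass jj s (fun i hi kv' hm' hp' =>
          hj2 i hi ((pvKeyOpen kv' hm').trans hp'))
      cases hsd : s.drop jj with
      | nil => rw [hsd] at hsj; simp [pvOpen] at hsj
      | cons c t =>
          rw [hsd] at hfindTags
          have hlen : (pvOpen ++ kv.1 ++ pvClose).length = kk.toNat + 6 := by
            simp [pvOpen, pvClose, hlenname]
          have hdrop_eq : t.drop ((pvOpen ++ kv.1 ++ pvClose).length - 1) =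
              s.drop (jj + 3 + kk.toNat + 3) := by
            have h1 : t.drop ((pvOpen ++ kv.1 ++ pvClose).length - 1) =
                (c :: t).drop (kk.toNat + 6) := by rw [hlen]; rfl
            rw [h1, ← hsd, List.drop_drop]
            congr 1
            omega
          rw [hpass, hsd, pvScan, hfindTags]
          simp only [hdrop_eq]
          simp
  | case2 res s hj jj kk hk hfind ih =>
      have hJ : jj = (PySem.Chars.find s pvOpen).toNat := rfl
      have hK : kk = PySem.Chars.find (List.drop (jj + 3) s) pvClose := rfl
      rw [bLoop]
      simp only [dif_pos hj, ← hJ, ← hK, if_pos hk, hfind]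
      rw [ih]
      obtain ⟨hj1, hj2⟩ := PySem.Chars.find_spec hj
      rw [← hJ] at hj1 hj2
      set w := s.drop (jj + 3) with hwdef
      have hsj : s.drop jj = pvOpen ++ w := by
        rcases hj1 with ⟨r, hr⟩
        have : r = w := by
          have := congrArg (List.drop 3) hr
          simpa [pvOpen, hwdef, List.drop_drop, Nat.add_comm] using this
        rw [← hr, this]
      have hnotag : ∀ kv' ∈ pvTags, ¬ kv'.1 <+: s.drop jj := by
        intro kv' hm' hp'
        rw [hsj] at hp'
        obtain ⟨nm, v, hnm, hkv', hfw, htake⟩ := pvKeyTest w kv' hm' hp'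
        have hkk : kk = (nm.length : Int) := by rw [hK, hfw]
        have := List.find?_eq_none.mp hfind (nm, v) hnm
        apply this
        have : List.take kk.toNat w = nm := by rw [hkk, Int.toNat_natCast, htake]
        simp [this]
      rw [pvScan_pass (jj + 3) s
        (pvSkipNoKey s jj (hsj ▸ ⟨w, rfl⟩) (fun i hi hop =>
          hj2 i hi hop) hnotag)]
      simp
      exact congrArg pvScan hwdef
  | case3 res s hj jj kk hk ih =>
      have hJ : jj = (PySem.Chars.find s pvOpen).toNat := rfl
      have hK : kk = PySem.Chars.find (List.drop (jj + 3) s) pvClose := rfl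
      rw [bLoop]
      simp only [dif_pos hj, ← hJ, ← hK, if_neg hk]
      rw [ih]
      obtain ⟨hj1, hj2⟩ := PySem.Chars.find_spec hj
      rw [← hJ] at hj1 hj2
      set w := s.drop (jj + 3) with hwdef
      have hsj : s.drop jj = pvOpen ++ w := by
        rcases hj1 with ⟨r, hr⟩
        have : r = w := by
          have := congrArg (List.drop 3) hr
          simpa [pvOpen, hwdef, List.drop_drop, Nat.add_comm] using this
        rw [← hr, this]
      have hnotag : ∀ kv' ∈ pvTags, ¬ kv'.1 <+: s.drop jj := by
        intro kv' hm' hp'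
        rw [hsj] at hp'
        obtain ⟨nm, v, hnm, hkv', hfw, htake⟩ := pvKeyTest w kv' hm' hp'
        have hkk : kk = (nm.length : Int) := by rw [hK, hfw]
        omega
      rw [pvScan_pass (jj + 3) s
        (pvSkipNoKey s jj (hsj ▸ ⟨w, rfl⟩) (fun i hi hop =>
          hj2 i hi hop) hnotag)]
      simp
      exact congrArg pvScan hwdef
  | case4 res s hj =>
      rw [bLoop]
      simp only [dif_neg hj]
      have hfn : PySem.Chars.find s pvOpen = -1 := by
        have := PySem.Chars.neg_one_le_find s pvOpen
        omega
      have hni : ¬ pvOpen <:+: s := (PySem.Chars.find_eq_neg_one_iff s pvOpen).mp hfn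
      have hnokey : ∀ i < s.length, ∀ kv' ∈ pvTags, ¬ kv'.1 <+: s.drop i := by
        intro i hi kv' hm' hp'
        have hop : pvOpen <+: s.drop i := (pvKeyOpen kv' hm').trans hp'
        exact hni (hop.isInfix.trans (List.drop_suffix i s).isInfix)
      rw [pvScan_pass s.length s hnokey]
      simp [pvScan]

-- ===== VERDICT (by name: the statement is the Claim_ definition above) =====
theorem replace_tag_ssml_spec : Claim_equal_replace_tag_ssml := by
  intro s _
  show replace_tag_ssml s = replace_tag_ssml_alt s
  rw [pvA_eq s, replace_tag_ssml_alt, pvB_main, pvMain]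
  simp
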